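-- pv_equiv track=rewrite | github.com/michalholes/audiomason2 | scripts/am_patch/scope.py | delta_paths
-- ===== SOURCE A (Python) =====
-- def _normalize_path(p: str) -> str:
--     p = p.strip()
--     if p.endswith("/") and p != "/":
--         p = p.rstrip("/")
--     return p
--
-- def delta_paths(before: list[str], after: list[str]) -> list[str]:
--     b = set(_normalize_path(x) for x in before)
--     out: list[str] = []
--     for p in after:
--         np = _normalize_path(p)
--         if np not in b:
--             out.append(np)
--     # unique preserve order
--     seen: set[str] = set()
--     final: list[str] = []
--     for p in out:
--         if p in seen:
--             continue
--         seen.add(p)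
--         final.append(p)
--     return final
-- ===== SOURCE B (Python) =====
-- def _normalize_path(p: str) -> str:
--     p = p.strip()
--     if p.endswith("/") and p != "/":
--         p = p.rstrip("/")
--     return p
--
-- def delta_paths(before, after):
--     # one combined pass: seed the dedup set with the normalized before-paths
--     seen = {_normalize_path(x) for x in before}
--     result = []
--     for p in after:
--         np = _normalize_path(p)
--         if np not in seen:
--             seen.add(np)
--             result.append(np)
--     return result
-- ===== Notes on version B (the rewrite author's own statement) =====
-- stated objective: simpler
-- what changed: Replaces A's filter pass over after plus a separate order-preserving dedup pass with one combined pass whose seen-set is seeded from the normalized before-set, so 'already in before' and 'already emitted' collapse into one membership test.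
import Mathlib
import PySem

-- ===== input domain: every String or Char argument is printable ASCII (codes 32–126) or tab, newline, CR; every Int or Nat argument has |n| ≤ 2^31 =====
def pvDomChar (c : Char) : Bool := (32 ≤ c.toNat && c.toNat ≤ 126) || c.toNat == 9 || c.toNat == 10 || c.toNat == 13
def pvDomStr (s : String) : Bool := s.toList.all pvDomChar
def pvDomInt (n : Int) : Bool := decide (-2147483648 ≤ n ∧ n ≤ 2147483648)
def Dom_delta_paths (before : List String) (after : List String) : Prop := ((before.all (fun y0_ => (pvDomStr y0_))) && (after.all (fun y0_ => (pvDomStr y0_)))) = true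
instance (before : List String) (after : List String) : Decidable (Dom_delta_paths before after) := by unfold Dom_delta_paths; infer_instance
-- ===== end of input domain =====

-- B merges A's filter+dedup passes into one pass over `after` with a seen-set seeded from before (simpler decomposition).


-- ===== PORT A =====
def pvNorm (p : String) : String :=
  let p1 := PySem.Str.strip p
  if PySem.Str.endswith p1 "/" && p1 != "/" then
    -- p.rstrip("/"): drop trailing '/' characters (hand port, exact)
    String.ofList ((p1.toList.reverse.dropWhile (fun c => c == '/')).reverse)
  else p1

def pvFilterA (b : PySem.Set String) : List String → List String
  | [] => []
  | p :: rest =>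
    let np := pvNorm p
    if !(PySem.Set.contains b np) then np :: pvFilterA b rest else pvFilterA b rest

def pvDedupA (seen : PySem.Set String) : List String → List String
  | [] => []
  | p :: rest =>
    if PySem.Set.contains seen p then pvDedupA seen rest
    else p :: pvDedupA (PySem.Set.add seen p) rest

def delta_paths (before : List String) (after : List String) : List String :=
  let b := PySem.Set.ofList (before.map pvNorm)
  pvDedupA PySem.Set.empty (pvFilterA b after)

-- ===== PORT B =====
def pvLoopB (seen : PySem.Set String) : List String → List String
  | [] => []
  | p :: rest =>
    let np := pvNorm p
    if !(PySem.Set.contains seen np) then np :: pvLoopB (PySem.Set.add seen np) rest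
    else pvLoopB seen rest

def delta_paths_alt (before : List String) (after : List String) : List String :=
  pvLoopB (PySem.Set.ofList (before.map pvNorm)) after

-- ===== PRECONDITION & SPEC =====
def Spec_delta_paths (before : List String) (after : List String) (out : List String) : Prop := out = delta_paths_alt before after
instance (before : List String) (after : List String) (out : List String) : Decidable (Spec_delta_paths before after out) := by unfold Spec_delta_paths; infer_instance

-- ===== CLAIM (what is proved, stated in full; the proofs are below) =====
def Claim_equal_delta_paths : Prop := ∀ (before : List String) (after : List String), Dom_delta_paths before after → Spec_delta_paths before after (delta_paths before after)

-- ===== LEMMAS AND PROOFS =====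
lemma pvLoop_eq_dedup_filter (after : List String) : ∀ (b s1 s2 : PySem.Set String),
    (∀ x, x ∈ s1 ↔ x ∈ s2 ∨ x ∈ b) →
    pvLoopB s1 after = pvDedupA s2 (pvFilterA b after) := by
  induction after with
  | nil => intro b s1 s2 _; simp [pvLoopB, pvFilterA, pvDedupA]
  | cons p rest ih =>
    intro b s1 s2 h
    simp only [pvLoopB, pvFilterA]
    by_cases hb : pvNorm p ∈ b
    · have h1 : pvNorm p ∈ s1 := (h _).2 (Or.inr hb)
      rw [(PySem.Set.contains_iff ..).2 hb, (PySem.Set.contains_iff ..).2 h1]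
      simpa using ih b s1 s2 h
    · have hbc : PySem.Set.contains b (pvNorm p) = false :=
        Bool.eq_false_iff.2 (fun hh => hb ((PySem.Set.contains_iff ..).1 hh))
      rw [hbc]
      simp only [Bool.not_false, if_true, pvDedupA]
      by_cases hs : pvNorm p ∈ s2
      · have h1 : pvNorm p ∈ s1 := (h _).2 (Or.inl hs)
        rw [(PySem.Set.contains_iff ..).2 hs, (PySem.Set.contains_iff ..).2 h1]
        simpa using ih b s1 s2 h
      · have h1 : pvNorm p ∉ s1 := fun hh => by
          rcases (h _).1 hh with h' | h' <;> [exact hs h'; exact hb h']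
        have h1c : PySem.Set.contains s1 (pvNorm p) = false :=
          Bool.eq_false_iff.2 (fun hh => h1 ((PySem.Set.contains_iff ..).1 hh))
        have hsc : PySem.Set.contains s2 (pvNorm p) = false :=
          Bool.eq_false_iff.2 (fun hh => hs ((PySem.Set.contains_iff ..).1 hh))
        rw [h1c, hsc]
        simp only [Bool.not_false, if_true]
        refine congrArg _ (ih b _ _ ?_)
        intro x
        simp only [PySem.Set.mem_add, h x]
        constructor
        · rintro ((hx | hx) | hx)
          exacts [Or.inl (Or.inl hx), Or.inr hx, Or.inl (Or.inr hx)]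
        · rintro ((hx | hx) | hx)
          exacts [Or.inl (Or.inl hx), Or.inr hx, Or.inl (Or.inr hx)]

-- ===== VERDICT (by name: the statement is the Claim_ definition above) =====
theorem delta_paths_spec : Claim_equal_delta_paths := by
  intro before after _
  show delta_paths before after = delta_paths_alt before after
  have h : ∀ x : String, x ∈ PySem.Set.ofList (before.map pvNorm) ↔
      x ∈ (PySem.Set.empty : PySem.Set String) ∨ x ∈ PySem.Set.ofList (before.map pvNorm) := by
    intro x
    constructor
    · exact Or.inr
    · rintro (hx | hx)
      · exact absurd hx (List.not_mem_nil)
      · exact hx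
  exact (pvLoop_eq_dedup_filter after (PySem.Set.ofList (before.map pvNorm))
    (PySem.Set.ofList (before.map pvNorm)) PySem.Set.empty h).symm
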